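-- pv_equiv track=rewrite | github.com/KDE/breeze-icons | utilities.py | uintbase62encode
-- ===== SOURCE A (Python) =====
-- def uintbase62encode(number):
--     number = abs(number)
--     b62 = "0123456789abcdefghijklmnopqrstuvwxyzABCDEFGHIJKLMNOPQRSTUVWXYZ"
--     base36 = ""
--
--     if number == 0:
--         return "0"
--
--     while number != 0:
--         number, i = divmod(number, len(b62))
--         base36 = b62[i] + base36
--
--     return base36
-- ===== SOURCE B (Python) =====
-- def uintbase62encode(number):
--     b62 = "0123456789abcdefghijklmnopqrstuvwxyzABCDEFGHIJKLMNOPQRSTUVWXYZ"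
--     n = abs(number)
--     if n == 0:
--         return "0"
--     # first pass: count the digits
--     d = 0
--     t = n
--     while t != 0:
--         t //= 62
--         d += 1
--     # second pass: emit most-significant digit first
--     out = []
--     for p in range(d - 1, -1, -1):
--         out.append(b62[(n // 62 ** p) % 62])
--     return "".join(out)
-- ===== Notes on version B (the rewrite author's own statement) =====
-- stated objective: alternative
-- what changed: Instead of repeated divmod with string prepending, B counts the digits in a first pass and then emits digits most-significant-first via (n // 62**p) % 62, joining a list at the end.
import Mathlib
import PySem

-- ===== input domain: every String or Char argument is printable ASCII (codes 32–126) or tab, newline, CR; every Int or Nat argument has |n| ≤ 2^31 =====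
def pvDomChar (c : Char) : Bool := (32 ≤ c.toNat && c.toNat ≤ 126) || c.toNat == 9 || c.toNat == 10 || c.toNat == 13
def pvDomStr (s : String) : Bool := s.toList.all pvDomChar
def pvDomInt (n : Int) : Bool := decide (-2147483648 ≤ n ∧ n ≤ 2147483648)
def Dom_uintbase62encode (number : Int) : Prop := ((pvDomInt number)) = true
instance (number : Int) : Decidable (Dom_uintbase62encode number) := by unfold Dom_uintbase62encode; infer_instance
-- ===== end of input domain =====

-- B builds the string most-significant digit first from a separate digit count, instead of
-- A's divmod loop that prepends to the accumulator; same return value, alternative structure.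

-- the shared 62-character alphabet
def pvB62 : List Char := "0123456789abcdefghijklmnopqrstuvwxyzABCDEFGHIJKLMNOPQRSTUVWXYZ".toList

-- ===== PORT A =====
-- A's while loop: number, i = divmod(number, 62); base36 = b62[i] + base36
-- (number = abs(original) is nonnegative, so divmod is Nat division; b62[i] with 0 ≤ i < 62 is in range)
def pvALoop : Nat → List Char → List Char
  | 0, acc => acc
  | (n+1), acc => pvALoop ((n+1) / 62) (pvB62.getD ((n+1) % 62) ' ' :: acc)
decreasing_by exact Nat.div_lt_self (Nat.succ_pos n) (by norm_num)

def uintbase62encode (number : Int) : String :=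
  let n := number.natAbs
  if n = 0 then "0" else String.ofList (pvALoop n [])

-- ===== PORT B =====
-- first pass of B: count the digits
def pvDigits : Nat → Nat
  | 0 => 0
  | (n+1) => pvDigits ((n+1) / 62) + 1
decreasing_by exact Nat.div_lt_self (Nat.succ_pos n) (by norm_num)

-- second pass of B: for p in range(d-1,-1,-1): append b62[(n // 62**p) % 62]
def uintbase62encode_alt (number : Int) : String :=
  let n := number.natAbs
  if n = 0 then "0" else
    let d := pvDigits n
    String.ofList ((List.range d).reverse.map (fun p => pvB62.getD ((n / 62 ^ p) % 62) ' '))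

-- ===== PRECONDITION & SPEC =====
def Spec_uintbase62encode (number : Int) (out : String) : Prop := out = uintbase62encode_alt number
instance (number : Int) (out : String) : Decidable (Spec_uintbase62encode number out) := by unfold Spec_uintbase62encode; infer_instance

-- ===== CLAIM (what is proved, stated in full; the proofs are below) =====
def Claim_equal_uintbase62encode : Prop := ∀ (number : Int), Dom_uintbase62encode number → Spec_uintbase62encode number (uintbase62encode number)

-- ===== LEMMAS AND PROOFS =====

theorem pvDigits_succ (n : Nat) (h : n ≠ 0) : pvDigits n = pvDigits (n / 62) + 1 := by
  cases n with
  | zero => exact absurd rfl h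
  | succ m => rw [pvDigits]

theorem pvALoop_ne (n : Nat) (acc : List Char) (h : n ≠ 0) :
    pvALoop n acc = pvALoop (n / 62) (pvB62.getD (n % 62) ' ' :: acc) := by
  cases n with
  | zero => exact absurd rfl h
  | succ m => rw [pvALoop]

theorem range_rev_map_succ {α : Type} (d : Nat) (f : Nat → α) :
    (List.range (d + 1)).reverse.map f = ((List.range d).reverse.map (fun p => f (p + 1))) ++ [f 0] := by
  rw [List.range_succ_eq_map]
  simp [List.map_reverse, List.map_map, Function.comp]

theorem pvALoop_eq (n : Nat) : ∀ (acc : List Char), n ≠ 0 →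
    pvALoop n acc = ((List.range (pvDigits n)).reverse.map (fun p => pvB62.getD ((n / 62 ^ p) % 62) ' ')) ++ acc := by
  induction n using Nat.strong_induction_on with
  | _ n ih =>
    intro acc h
    rw [pvALoop_ne n acc h, pvDigits_succ n h, range_rev_map_succ]
    have hshift : ∀ p : Nat, n / 62 / 62 ^ p = n / 62 ^ (p + 1) := by
      intro p
      rw [Nat.div_div_eq_div_mul, pow_succ, mul_comm]
    by_cases h2 : n / 62 = 0
    · rw [h2]
      simp [pvALoop, pvDigits, pow_zero, Nat.div_one]
    · rw [ih (n / 62) (Nat.div_lt_self (Nat.pos_of_ne_zero h) (by norm_num)) _ h2]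
      simp only [hshift, pow_zero, Nat.div_one, List.append_assoc, List.cons_append,
        List.nil_append]

-- ===== VERDICT (by name: the statement is the Claim_ definition above) =====
theorem uintbase62encode_spec : Claim_equal_uintbase62encode := by
  intro number _
  unfold Spec_uintbase62encode uintbase62encode uintbase62encode_alt
  by_cases h : number.natAbs = 0
  · simp [h]
  · simp only [h]
    rw [pvALoop_eq _ _ h, List.append_nil]
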